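-- pv_equiv track=rewrite | github.com/44rdvark/Networks | networks/evaluate_partition.py | evaluate
-- ===== SOURCE A (Python) =====
-- def evaluate(actual, found):
--     n_nodes = len(actual)
--     dist = 0
--     for i in range(n_nodes):
--         for j in range(i + 1, n_nodes):
--             if (found[i] == found[j]) != (actual[i] == actual[j]):
--                 dist += 1
--     return dist
-- ===== SOURCE B (Python) =====
-- def evaluate(actual, found):
--     n = len(actual)
--
--     def pairs(items):
--         counts = {}
--         for x in items:
--             counts[x] = counts.get(x, 0) + 1
--         return sum(k * (k - 1) // 2 for k in counts.values())
--
--     fl = found[:n]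
--     return pairs(fl) + pairs(actual) - 2 * pairs(list(zip(actual, fl)))
-- ===== Notes on version B (the rewrite author's own statement) =====
-- stated objective: faster
-- what changed: Replaces A's O(n^2) scan over all index pairs by O(n) contingency-table counting: build label counters for found[:n], actual, and the joint (actual, found) labels, and combine sums of k*(k-1)//2 over their counts.
-- outside the precondition, e.g. on evaluate([5], []): A returns 0, B returns 0
import Mathlib
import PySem

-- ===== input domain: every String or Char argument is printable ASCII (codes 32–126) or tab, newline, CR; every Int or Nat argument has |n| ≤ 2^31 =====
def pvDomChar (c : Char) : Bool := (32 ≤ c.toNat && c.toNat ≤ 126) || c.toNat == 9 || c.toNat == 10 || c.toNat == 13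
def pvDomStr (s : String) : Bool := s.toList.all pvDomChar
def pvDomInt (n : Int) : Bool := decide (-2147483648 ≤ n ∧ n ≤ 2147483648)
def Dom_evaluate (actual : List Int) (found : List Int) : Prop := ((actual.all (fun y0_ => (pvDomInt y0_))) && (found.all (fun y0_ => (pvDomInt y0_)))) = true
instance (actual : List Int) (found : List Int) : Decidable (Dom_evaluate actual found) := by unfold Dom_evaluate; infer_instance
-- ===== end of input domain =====

-- B replaces A's O(n^2) pair scan by O(n) contingency-table counting: Σ C(size,2) over
-- the label counters of found, actual, and their joint labels.

-- ===== PORT A =====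
-- literal transliteration of A: nested index loops over range(n), range(i+1, n)
def evaluate (actual : List Int) (found : List Int) : Int :=
  let n : Int := actual.length
  (PySem.List.pyRange 0 n 1).foldl (fun dist i =>
    (PySem.List.pyRange (i + 1) n 1).foldl (fun dist j =>
      if (PySem.List.pyGetD found i 0 == PySem.List.pyGetD found j 0)
           != (PySem.List.pyGetD actual i 0 == PySem.List.pyGetD actual j 0)
      then dist + 1 else dist) dist) 0

-- ===== PORT B =====
-- helper 'pairs' of Source B: count multiset, then sum k*(k-1)//2 over its values
def pvPairs (items : List α) [BEq α] : Int :=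
  let counts : PySem.Dict α Int :=
    items.foldl (fun d x => d.insert x (d.getD x 0 + 1)) PySem.Dict.empty
  (counts.values.map (fun k => PySem.Int.floordiv (k * (k - 1)) 2)).sum

def evaluate_alt (actual : List Int) (found : List Int) : Int :=
  let n : Int := actual.length
  let fl := PySem.List.slice found none (some n)
  pvPairs fl + pvPairs actual - 2 * pvPairs (actual.zip fl)

-- ===== PRECONDITION & SPEC =====
-- Pre_ excludes inputs with len(found) < len(actual), on which A raises IndexError at found[j]
-- (except when len(actual) <= 1, where no pair is ever indexed and A returns 0, as does B).
def Pre_evaluate (actual : List Int) (found : List Int) : Prop :=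
  actual.length ≤ found.length
instance (actual : List Int) (found : List Int) : Decidable (Pre_evaluate actual found) := by
  unfold Pre_evaluate; infer_instance

def pvWitness_evaluate : List Int × List Int := ([1, 1, 2], [1, 2, 2])

def Spec_evaluate (actual : List Int) (found : List Int) (out : Int) : Prop := out = evaluate_alt actual found
instance (actual : List Int) (found : List Int) (out : Int) : Decidable (Spec_evaluate actual found out) := by unfold Spec_evaluate; infer_instance

-- ===== CLAIM (what is proved, stated in full; the proofs are below) =====
def Claim_equal_evaluate : Prop := ∀ (actual : List Int) (found : List Int), Dom_evaluate actual found → Pre_evaluate actual found → Spec_evaluate actual found (evaluate actual found)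

-- ===== LEMMAS AND PROOFS =====

-- number of unordered pairs of equal elements, peeled from the front
def pairsEq (xs : List α) [BEq α] : Int :=
  match xs with
  | [] => 0
  | x :: t => (t.count x : Int) + pairsEq t

-- the xor condition of A, on elements of the zipped list
def pvQ (u v : Int × Int) : Bool := (u.2 == v.2) != (u.1 == v.1)

def pairsR (xs : List (Int × Int)) : Int :=
  match xs with
  | [] => 0
  | x :: t => (t.countP (pvQ x) : Int) + pairsR t

theorem beq_comm_int (a b : Int) : (a == b) = (b == a) := by
  rw [Bool.eq_iff_iff]; simp only [beq_iff_eq]; exact eq_comm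

theorem countP_pvQ (x : Int × Int) (t : List (Int × Int)) :
    (t.countP (pvQ x) : Int) =
      ((t.map (·.2)).count x.2 : Int) + ((t.map (·.1)).count x.1 : Int) - 2 * (t.count x : Int) := by
  induction t with
  | nil => simp
  | cons v t ih =>
    simp only [List.countP_cons, List.map_cons, List.count_cons]
    push_cast
    rw [ih]
    have hx : (v == x) = ((x.1 == v.1) && (x.2 == v.2)) := by
      rw [Bool.eq_iff_iff]; simp only [beq_iff_eq, Bool.and_eq_true, Prod.ext_iff]
      constructor <;> exact fun h => ⟨h.1.symm, h.2.symm⟩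
    rw [pvQ, hx, beq_comm_int v.2 x.2, beq_comm_int v.1 x.1]
    cases hb1 : (x.1 == v.1) <;> cases hb2 : (x.2 == v.2) <;> simp <;> omega

theorem pairsR_decompose (z : List (Int × Int)) :
    pairsR z = pairsEq (z.map (·.2)) + pairsEq (z.map (·.1)) - 2 * pairsEq z := by
  induction z with
  | nil => simp [pairsR, pairsEq]
  | cons x t ih =>
    simp only [pairsR, pairsEq, List.map_cons]
    rw [ih, countP_pvQ]
    ring

-- the nested index loops, summed structurally
theorem sum_countP (z : List (Int × Int)) :
    ((List.range z.length).map
        (fun k => (((z.drop (k + 1)).countP (pvQ (z.getD k (0, 0)))) : Int))).sum = pairsR z := by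
  induction z with
  | nil => simp [pairsR]
  | cons x t ih =>
    rw [List.length_cons, List.range_succ_eq_map]
    simp only [List.map_cons, List.map_map, List.sum_cons, Function.comp_def]
    have hpt : ∀ k : Nat,
        ((((x :: t).drop (k + 1 + 1)).countP (pvQ ((x :: t).getD (k + 1) (0, 0)))) : Int)
          = (((t.drop (k + 1)).countP (pvQ (t.getD k (0, 0)))) : Int) := by
      intro k; simp
    simp only [hpt]
    rw [ih, pairsR]
    simp [add_comm]

theorem c2_cast (n : Nat) :
    PySem.Int.floordiv ((n : Int) * ((n : Int) - 1)) 2 = (n.choose 2 : Int) := by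
  cases n with
  | zero => decide
  | succ m =>
    have h : ((m + 1 : Nat) : Int) * (((m + 1 : Nat) : Int) - 1) = (((m + 1) * m : Nat) : Int) := by
      push_cast; ring
    rw [h, show (2 : Int) = ((2 : Nat) : Int) from rfl, PySem.Int.floordiv_natCast]
    norm_cast
    rw [Nat.choose_two_right]
    simp

theorem finsetC2 {α : Type} [BEq α] [LawfulBEq α] [DecidableEq α] (xs : List α) :
    (∑ k ∈ xs.toFinset, (((xs.count k).choose 2 : Nat) : Int)) = pairsEq xs := by
  induction xs with
  | nil => simp [pairsEq]
  | cons x t ih =>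
    rw [show pairsEq (x :: t) = (t.count x : Int) + pairsEq t from rfl, ← ih]
    by_cases hx : x ∈ t
    · have h1 : (x :: t).toFinset = t.toFinset := by
        simp [List.toFinset_cons, Finset.insert_eq_self.mpr (List.mem_toFinset.mpr hx)]
      rw [h1]
      have h2 : ∀ k ∈ t.toFinset,
          ((((x :: t).count k).choose 2 : Nat) : Int)
            = (((t.count k).choose 2 : Nat) : Int) + (if k = x then (t.count x : Int) else 0) := by
        intro k _
        by_cases hkx : k = x
        · subst hkx
          rw [List.count_cons_self, Nat.choose_succ_succ, Nat.choose_one_right, if_pos rfl]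
          push_cast; ring
        · rw [List.count_cons_of_ne (Ne.symm hkx)]; simp [hkx]
      rw [Finset.sum_congr rfl h2, Finset.sum_add_distrib, Finset.sum_ite_eq' t.toFinset x]
      simp [List.mem_toFinset.mpr hx]
      ring
    · have h0 : t.count x = 0 := List.count_eq_zero.mpr hx
      rw [List.toFinset_cons, Finset.sum_insert (by simp [hx])]
      have h2 : ∀ k ∈ t.toFinset,
          ((((x :: t).count k).choose 2 : Nat) : Int) = (((t.count k).choose 2 : Nat) : Int) := by
        intro k hk
        rw [List.count_cons_of_ne (by rintro rfl; exact hx (List.mem_toFinset.mp hk))]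
        
      rw [Finset.sum_congr rfl h2, List.count_cons_self, h0]
      simp

theorem pvPairs_eq_pairsEq {α : Type} [BEq α] [LawfulBEq α] (xs : List α) : pvPairs xs = pairsEq xs := by
  haveI : DecidableEq α := fun a b => decidable_of_iff ((a == b) = true) beq_iff_eq
  show (List.map (fun k => PySem.Int.floordiv (k * (k - 1)) 2)
      (xs.foldl (fun d x => d.insert x (d.getD x 0 + 1)) PySem.Dict.empty).values).sum = pairsEq xs
  rw [PySem.Dict.foldl_insert_getD_add_one_eq_counter]
  have hv : (PySem.Dict.counter xs).values
      = (PySem.Set.ofList xs).map (fun k => ((xs.count k : Nat) : Int)) := by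
    simp only [PySem.Dict.values, PySem.Dict.items_counter, List.map_map, Function.comp_def]
  rw [hv, List.map_map]
  have hfun : ∀ k : α,
      PySem.Int.floordiv (((xs.count k : Nat) : Int) * (((xs.count k : Nat) : Int) - 1)) 2
        = (((xs.count k).choose 2 : Nat) : Int) := fun k => c2_cast (xs.count k)
  simp only [Function.comp_def, hfun]
  rw [← List.sum_toFinset _ (PySem.Set.nodup_ofList xs)]
  have hts : (PySem.Set.ofList xs).toFinset = xs.toFinset := by
    apply Finset.ext; intro a; simp [List.mem_toFinset, PySem.Set.mem_ofList]
  rw [hts, finsetC2]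

theorem evaluate_eq_pairsR (actual found : List Int) (h : actual.length ≤ found.length) :
    evaluate actual found = pairsR (actual.zip (found.take actual.length)) := by
  have hz : (actual.zip (found.take actual.length)).length = actual.length := by
    simp [List.length_zip, List.length_take]; omega
  set z := actual.zip (found.take actual.length) with hzdef
  -- unfold A's nested loops
  show (PySem.List.pyRange 0 (actual.length : Int) 1).foldl (fun dist i =>
      (PySem.List.pyRange (i + 1) (actual.length : Int) 1).foldl (fun dist j =>
        if (PySem.List.pyGetD found i 0 == PySem.List.pyGetD found j 0)
             != (PySem.List.pyGetD actual i 0 == PySem.List.pyGetD actual j 0)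
        then dist + 1 else dist) dist) 0 = pairsR z
  -- the condition at in-range indices is pvQ on the zipped list
  have hcond : ∀ i j : Int, 0 ≤ i → i < j → j < (actual.length : Int) →
      ((PySem.List.pyGetD found i 0 == PySem.List.pyGetD found j 0)
        != (PySem.List.pyGetD actual i 0 == PySem.List.pyGetD actual j 0))
      = pvQ (PySem.List.pyGetD z i (0, 0)) (PySem.List.pyGetD z j (0, 0)) := by
    intro i j hi hij hj
    have hi' : i < (actual.length : Int) := lt_trans hij hj
    have hj0 : 0 ≤ j := le_trans hi (le_of_lt hij)
    have hiz : i < ((z.length : Nat) : Int) := by rw [hz]; exact hi'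
    have hjz : j < ((z.length : Nat) : Int) := by rw [hz]; exact hj
    have hif : i < (found.length : Int) := by exact_mod_cast lt_of_lt_of_le hi' (by exact_mod_cast h)
    have hjf : j < (found.length : Int) := by exact_mod_cast lt_of_lt_of_le hj (by exact_mod_cast h)
    rw [PySem.List.pyGetD_eq_getElem z (0, 0) hi hiz, PySem.List.pyGetD_eq_getElem z (0, 0) hj0 hjz,
        PySem.List.pyGetD_eq_getElem actual 0 hi hi', PySem.List.pyGetD_eq_getElem actual 0 hj0 hj,
        PySem.List.pyGetD_eq_getElem found 0 hi hif, PySem.List.pyGetD_eq_getElem found 0 hj0 hjf]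
    have hgz : ∀ (k : Nat) (hk : k < z.length),
        z[k] = (actual[k]'(by rw [hz] at hk; exact hk),
                found[k]'(by rw [hz] at hk; omega)) := by
      intro k hk
      simp only [hzdef, List.getElem_zip, List.getElem_take]
    rw [hgz i.toNat (by omega), hgz j.toNat (by omega)]
    rfl
  -- rewrite the inner loop into a count over the dropped suffix
  have hinner : ∀ (dist i : Int), 0 ≤ i → i < (actual.length : Int) →
      (PySem.List.pyRange (i + 1) (actual.length : Int) 1).foldl (fun dist j =>
        if (PySem.List.pyGetD found i 0 == PySem.List.pyGetD found j 0)
             != (PySem.List.pyGetD actual i 0 == PySem.List.pyGetD actual j 0)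
        then dist + 1 else dist) dist
      = dist + (((z.drop (i + 1).toNat).countP (pvQ (PySem.List.pyGetD z i (0, 0)))) : Int) := by
    intro dist i hi0 hin
    rw [PySem.List.foldl_congr_mem _ _
        (fun dist j => if pvQ (PySem.List.pyGetD z i (0, 0)) (PySem.List.pyGetD z j (0, 0))
          then dist + 1 else dist) dist
        (by
          intro acc j hj
          rw [PySem.List.mem_pyRange_one] at hj
          rw [hcond i j hi0 (by omega) hj.2])]
    have := PySem.List.foldl_pyRange_pyGetD' z (0, 0)
      (fun dist e => if pvQ (PySem.List.pyGetD z i (0, 0)) e then dist + 1 else dist) dist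
      (a := i + 1) (by omega)
    rw [hz] at this
    rw [this, PySem.List.foldl_count_if]
  rw [PySem.List.foldl_congr_mem _ _
      (fun dist i => dist + (((z.drop (i + 1).toNat).countP (pvQ (PySem.List.pyGetD z i (0, 0)))) : Int)) 0
      (by
        intro acc i hi
        rw [PySem.List.mem_pyRange_one] at hi
        exact hinner acc i hi.1 hi.2)]
  rw [← hz, PySem.List.pyRange_zero_nat z.length, List.foldl_map, PySem.List.foldl_add]
  have hfun : ∀ k : Nat,
      (((z.drop ((k : Int) + 1).toNat).countP (pvQ (PySem.List.pyGetD z (k : Int) (0, 0)))) : Int)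
        = (((z.drop (k + 1)).countP (pvQ (z.getD k (0, 0)))) : Int) := by
    intro k
    have h1 : ((k : Int) + 1).toNat = k + 1 := by omega
    rw [h1, PySem.List.pyGetD_natCast]
  simp only [hfun]
  rw [sum_countP z]
  simp

-- ===== VERDICT (by name: the statement is the Claim_ definition above) =====
theorem evaluate_spec : Claim_equal_evaluate := by
  intro actual found _ hpre
  unfold Spec_evaluate
  show _ = pvPairs (PySem.List.slice found none (some (actual.length : Int))) + pvPairs actual - 2 * pvPairs (actual.zip (PySem.List.slice found none (some (actual.length : Int))))
  rw [PySem.List.slice_to_natCast found actual.length]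
  rw [evaluate_eq_pairsR actual found hpre]
  rw [pairsR_decompose, pvPairs_eq_pairsEq, pvPairs_eq_pairsEq, pvPairs_eq_pairsEq]
  unfold Pre_evaluate at hpre
  have hlen : (found.take actual.length).length = actual.length := by
    simp [List.length_take]; omega
  rw [show (fun x : Int × Int => x.2) = Prod.snd from rfl,
     show (fun x : Int × Int => x.1) = Prod.fst from rfl,
     List.map_snd_zip (le_of_eq hlen), List.map_fst_zip (le_of_eq hlen.symm)]
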